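-- pv_equiv track=rewrite | github.com/ngan-110/OA_RobotAstro | Astro-Website/COMPONENTS/back_search.py | get_headlines
-- ===== SOURCE A (Python) =====
-- def get_headlines(words, headlines):
--     popular_headlines = []
--     for word in words:
--         for headline in headlines:
--             if word in headline.split():
--                 popular_headlines.append(headline)
--             else:
--                 continue
--     return popular_headlines
-- ===== SOURCE B (Python) =====
-- def get_headlines(words, headlines):
--     # Inverted index: word -> list of headlines containing it (built once).
--     index = {}
--     for headline in headlines:
--         for w in set(headline.split()):
--             index.setdefault(w, []).append(headline)
--     result = []
--     for word in words:
--         result.extend(index.get(word, []))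
--     return result
-- ===== Notes on version B (the rewrite author's own statement) =====
-- stated objective: faster
-- what changed: B builds an inverted index word->headlines in one pass over the headlines and then answers each query word by a single dictionary lookup, removing the per-word scan over headlines entirely.
import Mathlib
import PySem

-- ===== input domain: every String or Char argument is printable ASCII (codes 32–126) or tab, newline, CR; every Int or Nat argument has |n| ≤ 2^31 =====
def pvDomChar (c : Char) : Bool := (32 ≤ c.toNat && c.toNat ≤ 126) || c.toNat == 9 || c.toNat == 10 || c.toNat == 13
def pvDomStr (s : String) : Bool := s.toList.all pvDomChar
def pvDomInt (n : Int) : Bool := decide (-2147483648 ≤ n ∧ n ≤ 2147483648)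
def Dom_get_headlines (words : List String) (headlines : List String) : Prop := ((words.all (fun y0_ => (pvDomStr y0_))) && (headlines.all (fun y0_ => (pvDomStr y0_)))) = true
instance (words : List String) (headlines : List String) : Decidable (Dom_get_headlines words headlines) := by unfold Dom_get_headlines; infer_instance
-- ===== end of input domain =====

-- B replaces A's nested word x headline scan by an inverted index (word -> matching headlines)
-- built in one pass, then one dictionary lookup per query word; measurably faster on large inputs.

-- ===== PORT A =====
def get_headlines (words : List String) (headlines : List String) : List String :=
  words.foldl (fun acc word =>
    headlines.foldl (fun acc2 headline =>
      if word ∈ PySem.Str.split₀ headline then acc2 ++ [headline] else acc2) acc) []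

-- ===== PORT B =====
def get_headlines_alt (words : List String) (headlines : List String) : List String :=
  let index : PySem.Dict String (List String) :=
    headlines.foldl (fun d headline =>
      (PySem.Set.ofList (PySem.Str.split₀ headline)).foldl
        (fun d w => d.modify w [] (fun l => l ++ [headline])) d)
      PySem.Dict.empty
  words.foldl (fun result word => result ++ index.getD word []) []

-- ===== PRECONDITION & SPEC =====
def Spec_get_headlines (words : List String) (headlines : List String) (out : List String) : Prop := out = get_headlines_alt words headlines
instance (words : List String) (headlines : List String) (out : List String) : Decidable (Spec_get_headlines words headlines out) := by unfold Spec_get_headlines; infer_instance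

-- ===== CLAIM (what is proved, stated in full; the proofs are below) =====
def Claim_equal_get_headlines : Prop := ∀ (words : List String) (headlines : List String), Dom_get_headlines words headlines → Spec_get_headlines words headlines (get_headlines words headlines)

-- ===== LEMMAS AND PROOFS =====

-- Inner loop of the index build: over a Nodup word list, each word's bucket gains the headline once.
theorem pv_inner (ws : List String) (hnd : ws.Nodup) (d : PySem.Dict String (List String))
    (h : String) (v : String) :
    (ws.foldl (fun d w => d.modify w [] (fun l => l ++ [h])) d).getD v []
      = d.getD v [] ++ (if v ∈ ws then [h] else []) := by
  induction ws generalizing d with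
  | nil => simp
  | cons w t ih =>
    simp only [List.foldl_cons]
    rcases List.nodup_cons.mp hnd with ⟨hw, hnd'⟩
    rw [ih hnd', PySem.Dict.getD_modify]
    by_cases hv : v = w
    · subst hv; simp [hw]
    · by_cases hvt : v ∈ t <;> simp [hv, hvt]

-- Outer loop: the built index maps each word to the headlines (in order) whose split contains it.
theorem pv_index (headlines : List String) (d : PySem.Dict String (List String)) (v : String) :
    (headlines.foldl (fun d headline =>
        (PySem.Set.ofList (PySem.Str.split₀ headline)).foldl
          (fun d w => d.modify w [] (fun l => l ++ [headline])) d) d).getD v []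
      = d.getD v [] ++ headlines.filter (fun h => decide (v ∈ PySem.Str.split₀ h)) := by
  induction headlines generalizing d with
  | nil => simp
  | cons h t ih =>
    simp only [List.foldl_cons, List.filter_cons]
    rw [ih, pv_inner _ (PySem.Set.nodup_ofList _)]
    by_cases hm : v ∈ PySem.Str.split₀ h
    · simp [PySem.Set.mem_ofList, hm]
    · simp [PySem.Set.mem_ofList, hm]

-- A's nested loops accumulate, per word, exactly the filtered headlines.
theorem pv_outer (words headlines : List String) (acc : List String) :
    words.foldl (fun acc word =>
      headlines.foldl (fun acc2 headline =>
        if word ∈ PySem.Str.split₀ headline then acc2 ++ [headline] else acc2) acc) acc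
    = acc ++ words.flatMap (fun w => headlines.filter (fun h => decide (w ∈ PySem.Str.split₀ h))) := by
  induction words generalizing acc with
  | nil => simp
  | cons w ws ih =>
    simp only [List.foldl_cons, List.flatMap_cons]
    rw [PySem.List.foldl_append_ite_eq_filter, ih, List.append_assoc]

-- B's answer loop concatenates the buckets in query order.
theorem pv_answer (words : List String) (f : String → List String) (acc : List String) :
    words.foldl (fun result word => result ++ f word) acc = acc ++ words.flatMap f := by
  induction words generalizing acc with
  | nil => simp
  | cons w ws ih => simp [ih, List.append_assoc]

-- ===== VERDICT (by name: the statement is the Claim_ definition above) =====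
theorem get_headlines_spec : Claim_equal_get_headlines := by
  intro words headlines _
  unfold Spec_get_headlines get_headlines get_headlines_alt
  rw [pv_outer, pv_answer]
  simp only [List.nil_append]
  congr 1
  funext w
  rw [pv_index]
  simp
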